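-- pv_equiv track=rewrite | github.com/DGSR/hwpythone | homework7/hw2.py | sign_replacement
-- ===== SOURCE A (Python) =====
-- def sign_replacement(string: str, sign: str = '#') -> str:
--     """
--     return string where each given sign and a symbol before is deleted
--     """
--     res = ''
--     for i in string:
--         if i == sign:
--             res = res[:-1]
--         else:
--             res += i
--     return res
-- ===== SOURCE B (Python) =====
-- def sign_replacement(string: str, sign: str = '#') -> str:
--     # Scan right-to-left keeping a count of pending deletions instead of
--     # editing an accumulated string: each sign increments the counter, a
--     # non-sign char is skipped while deletions are pending, else kept.
--     out = []
--     pending = 0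
--     for ch in reversed(string):
--         if ch == sign:
--             pending += 1
--         elif pending:
--             pending -= 1
--         else:
--             out.append(ch)
--     return ''.join(reversed(out))
-- ===== Notes on version B (the rewrite author's own statement) =====
-- stated objective: alternative
-- what changed: Single right-to-left pass with a pending-deletions counter and a final join, instead of editing an accumulated result string with slicing/concatenation; trades A's in-place string edits for a counter-based scan of the same linear cost.
import Mathlib
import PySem

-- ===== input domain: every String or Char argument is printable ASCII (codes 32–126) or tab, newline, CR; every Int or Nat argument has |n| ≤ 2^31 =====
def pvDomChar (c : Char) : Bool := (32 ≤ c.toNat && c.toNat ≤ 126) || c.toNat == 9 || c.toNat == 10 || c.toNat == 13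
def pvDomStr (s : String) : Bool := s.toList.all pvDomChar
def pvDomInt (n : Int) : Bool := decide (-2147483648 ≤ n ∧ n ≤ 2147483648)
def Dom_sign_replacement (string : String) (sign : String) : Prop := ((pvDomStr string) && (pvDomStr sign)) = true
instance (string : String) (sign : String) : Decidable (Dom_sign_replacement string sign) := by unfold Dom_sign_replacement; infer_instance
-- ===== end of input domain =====

-- B replaces A's repeated string slicing/concatenation by one right-to-left pass
-- with a pending-deletions counter (objective: alternative algorithm, same cost).

-- ===== PORT A =====
-- A's loop over the characters of `string`, accumulating `res`; Python's
-- `i == sign` compares the 1-char string to `sign`; `res[:-1]` on a string is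
-- exactly `List.dropLast` on its characters, `res += i` is append.
def sign_replacement (string : String) (sign : String) : String :=
  String.mk (string.toList.foldl
    (fun res c => if String.mk [c] = sign then res.dropLast else res ++ [c]) [])

-- ===== PORT B =====
-- B's step on one character, scanning from the right: state = (pending, kept).
def pvAltStep (sign : String) (c : Char) (st : Nat × List Char) : Nat × List Char :=
  if String.mk [c] = sign then (st.1 + 1, st.2)
  else if st.1 ≠ 0 then (st.1 - 1, st.2)
  else (0, c :: st.2)

-- B scans `reversed(string)` appending kept chars and reverses at the end;
-- that right-to-left accumulation is exactly a foldr with cons.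
def sign_replacement_alt (string : String) (sign : String) : String :=
  String.mk (string.toList.foldr (pvAltStep sign) (0, [])).2

-- ===== PRECONDITION & SPEC =====
def Spec_sign_replacement (string : String) (sign : String) (out : String) : Prop := out = sign_replacement_alt string sign
instance (string : String) (sign : String) (out : String) : Decidable (Spec_sign_replacement string sign out) := by unfold Spec_sign_replacement; infer_instance

-- ===== CLAIM (what is proved, stated in full; the proofs are below) =====
def Claim_equal_sign_replacement : Prop := ∀ (string : String) (sign : String), Dom_sign_replacement string sign → Spec_sign_replacement string sign (sign_replacement string sign)

-- ===== LEMMAS AND PROOFS =====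

-- drop the last n characters
def pvDropLastN : Nat → List Char → List Char
  | 0, l => l
  | n + 1, l => pvDropLastN n l.dropLast

theorem pvDropLastN_nil : ∀ n, pvDropLastN n [] = [] := by
  intro n; induction n with
  | zero => rfl
  | succ n ih => simpa [pvDropLastN] using ih

theorem pvDropLastN_concat (n : Nat) (l : List Char) (c : Char) :
    pvDropLastN (n + 1) (l ++ [c]) = pvDropLastN n l := by
  simp [pvDropLastN]

-- Main invariant: A's left fold from any accumulator `res` equals `res` with
-- B's pending deletions removed from its end, followed by B's kept characters.
theorem pv_invariant (sign : String) (l : List Char) :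
    ∀ res : List Char,
      l.foldl (fun res c => if String.mk [c] = sign then res.dropLast else res ++ [c]) res
        = pvDropLastN (l.foldr (pvAltStep sign) (0, [])).1 res
            ++ (l.foldr (pvAltStep sign) (0, [])).2 := by
  induction l with
  | nil => intro res; simp [pvDropLastN]
  | cons c l ih =>
    intro res
    by_cases h : String.mk [c] = sign
    · simp only [List.foldl_cons, List.foldr_cons, pvAltStep, h, ih]
      rfl
    · simp only [List.foldl_cons, List.foldr_cons, pvAltStep, if_neg h, ih]
      rcases hp : (l.foldr (pvAltStep sign) (0, [])).1 with _ | p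
      · simp [hp, pvDropLastN, List.append_assoc]
      · have hne : (p + 1 : Nat) ≠ 0 := by omega
        simp [hp, hne, pvDropLastN_concat]

-- ===== VERDICT (by name: the statement is the Claim_ definition above) =====
theorem sign_replacement_spec : Claim_equal_sign_replacement := by
  intro string sign _
  unfold Spec_sign_replacement sign_replacement sign_replacement_alt
  rw [pv_invariant sign string.toList []]
  simp [pvDropLastN_nil]
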